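-- pv_equiv track=rewrite | github.com/ITISFoundation/osparc-simcore | services/dynamic-sidecar/src/simcore_service_dynamic_sidecar/utils.py | _merge_env_vars
-- ===== SOURCE A (Python) =====
-- from typing import Any, AsyncGenerator, Dict, Generator, List, Tuple
--
-- def _merge_env_vars(
--     compose_spec_env_vars: List[str], settings_env_vars: List[str]
-- ) -> List[str]:
--     def _gen_parts_env_vars(
--         env_vars: List[str],
--     ) -> Generator[Tuple[str, str], None, None]:
--         for env_var in env_vars:
--             key, value = env_var.split("=")
--             yield key, value
--
--     # pylint: disable=unnecessary-comprehension
--     dict_spec_env_vars = {k: v for k, v in _gen_parts_env_vars(compose_spec_env_vars)}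
--     dict_settings_env_vars = {k: v for k, v in _gen_parts_env_vars(settings_env_vars)}
--
--     # overwrite spec vars with vars from settings
--     for key, value in dict_settings_env_vars.items():
--         dict_spec_env_vars[key] = value
--
--     # returns a single list of vars
--     return [f"{k}={v}" for k, v in dict_spec_env_vars.items()]
-- ===== SOURCE B (Python) =====
-- def _merge_env_vars(compose_spec_env_vars, settings_env_vars):
--     # Parse everything once into one pair list (spec first, then settings).
--     pairs = [env_var.split("=") for env_var in compose_spec_env_vars]
--     pairs += [env_var.split("=") for env_var in settings_env_vars]
--
--     def _last_value(key):
--         # the final value of a key is the one in its last occurrence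
--         for k, v in reversed(pairs):
--             if k == key:
--                 return v
--
--     out = []
--     seen = []
--     for key, _ in pairs:
--         if key not in seen:
--             seen.append(key)
--             out.append(f"{key}={_last_value(key)}")
--     return out
-- ===== Notes on version B (the rewrite author's own statement) =====
-- stated objective: alternative
-- what changed: B drops the dicts entirely: it parses both lists into one pair list, emits each key at its first occurrence (tracked by a seen-list) and finds its value by scanning the pair list backwards for the last occurrence, instead of A's two dicts plus an overwrite-merge loop; Pre_ excludes entries that do not split on '=' into exactly two parts, where both A and B raise ValueError.
import Mathlib
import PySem

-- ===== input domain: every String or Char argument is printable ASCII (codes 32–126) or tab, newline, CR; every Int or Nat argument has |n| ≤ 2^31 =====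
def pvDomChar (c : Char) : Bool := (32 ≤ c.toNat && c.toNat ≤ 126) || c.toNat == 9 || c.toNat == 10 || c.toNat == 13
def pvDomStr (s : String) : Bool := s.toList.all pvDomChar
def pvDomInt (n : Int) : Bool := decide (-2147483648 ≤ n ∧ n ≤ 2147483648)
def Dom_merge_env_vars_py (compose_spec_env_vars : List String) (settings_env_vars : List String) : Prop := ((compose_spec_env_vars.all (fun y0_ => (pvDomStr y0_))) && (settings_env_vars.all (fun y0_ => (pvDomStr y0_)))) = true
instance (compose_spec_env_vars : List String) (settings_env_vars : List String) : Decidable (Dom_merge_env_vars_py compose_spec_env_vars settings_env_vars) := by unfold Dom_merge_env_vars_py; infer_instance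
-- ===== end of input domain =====

-- B drops A's two-dict-plus-merge structure: it keeps the first occurrence of each key (seen-list)
-- and finds each key's final value by a backward scan of one parsed pair list (no dict at all).

-- ===== PORT A =====
-- `key, value = env_var.split("=")` (exact when the split yields two parts; Pre_ guarantees that)
def pvParseKV (s : String) : String × String :=
  match (PySem.Str.split? s "=").getD [] with
  | [k, v] => (k, v)
  | _ => ("", "")

-- dict comprehension {k: v for k, v in _gen_parts_env_vars(env_vars)}
def pvDictOf (env_vars : List String) : PySem.Dict String String :=
  env_vars.foldl (fun d s => d.insert (pvParseKV s).1 (pvParseKV s).2) PySem.Dict.empty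

def merge_env_vars_py (compose_spec_env_vars : List String) (settings_env_vars : List String) : List String :=
  let dict_spec_env_vars := pvDictOf compose_spec_env_vars
  let dict_settings_env_vars := pvDictOf settings_env_vars
  -- for key, value in dict_settings_env_vars.items(): dict_spec_env_vars[key] = value
  let merged := dict_settings_env_vars.items.foldl
      (fun d p => d.insert p.1 p.2) dict_spec_env_vars
  merged.items.map (fun p => p.1 ++ "=" ++ p.2)

-- ===== PORT B =====
-- _last_value(key): backward scan of `pairs` for the last occurrence of `key`; in Source B the
-- loop always finds the key when called (key comes from `pairs`), so the `.getD ""` default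
-- standing for Python's implicit None is never used on any admitted input.
def pvLastValue (pairs : List (String × String)) (key : String) : String :=
  ((pairs.reverse.find? (fun p => p.1 == key)).map Prod.snd).getD ""

def merge_env_vars_py_alt (compose_spec_env_vars : List String) (settings_env_vars : List String) : List String :=
  -- pairs = [e.split("=") for e in spec]; pairs += [e.split("=") for e in settings]
  let pairs := compose_spec_env_vars.map pvParseKV ++ settings_env_vars.map pvParseKV
  -- for key, _ in pairs: if key not in seen: seen.append(key); out.append(f"{key}={_last_value(key)}")
  (pairs.foldl
    (fun (st : List String × List String) p =>
      if st.2.contains p.1 then st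
      else (st.1 ++ [p.1 ++ "=" ++ pvLastValue pairs p.1], st.2 ++ [p.1]))
    ([], [])).1

-- ===== PRECONDITION & SPEC =====
-- Pre_ excludes exactly the entries on which `env_var.split("=")` does not unpack into two parts
-- (no '=' or more than one '='), where the Python A raises ValueError (and B raises too).
def Pre_merge_env_vars_py (compose_spec_env_vars : List String) (settings_env_vars : List String) : Prop :=
  ∀ s ∈ compose_spec_env_vars ++ settings_env_vars, ((PySem.Str.split? s "=").getD []).length = 2
instance (compose_spec_env_vars : List String) (settings_env_vars : List String) : Decidable (Pre_merge_env_vars_py compose_spec_env_vars settings_env_vars) := by unfold Pre_merge_env_vars_py; infer_instance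
def pvWitness_merge_env_vars_py : List String × List String := (["A=1", "B=2"], ["B=3", "C=4"])
def Spec_merge_env_vars_py (compose_spec_env_vars : List String) (settings_env_vars : List String) (out : List String) : Prop := out = merge_env_vars_py_alt compose_spec_env_vars settings_env_vars
instance (compose_spec_env_vars : List String) (settings_env_vars : List String) (out : List String) : Decidable (Spec_merge_env_vars_py compose_spec_env_vars settings_env_vars out) := by unfold Spec_merge_env_vars_py; infer_instance

-- ===== CLAIM (what is proved, stated in full; the proofs are below) =====
def Claim_equal_merge_env_vars_py : Prop := ∀ (compose_spec_env_vars : List String) (settings_env_vars : List String), Dom_merge_env_vars_py compose_spec_env_vars settings_env_vars → Pre_merge_env_vars_py compose_spec_env_vars settings_env_vars → Spec_merge_env_vars_py compose_spec_env_vars settings_env_vars (merge_env_vars_py compose_spec_env_vars settings_env_vars)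

-- ===== LEMMAS AND PROOFS =====

-- last-match characterisation of an insert fold
theorem pvGet?_foldl_insert {α : Type} (kf : α → String) (vf : α → String)
    (l : List α) (d : PySem.Dict String String) (j : String) :
    (l.foldl (fun d x => d.insert (kf x) (vf x)) d).get? j
      = ((l.reverse.find? (fun x => kf x == j)).map vf).or (d.get? j) := by
  induction l generalizing d with
  | nil => simp
  | cons x t ih =>
      simp only [List.foldl_cons, List.reverse_cons, List.find?_append, ih]
      by_cases hx : kf x = j
      · cases hf : t.reverse.find? (fun x => kf x == j) with
        | none => simp [hx]
        | some y => simp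
      · cases hf : t.reverse.find? (fun x => kf x == j) with
        | none => simp [hx, PySem.Dict.get?_insert, Ne.symm hx]
        | some y => simp

-- keys of the insert fold
theorem pvKeys_foldl_insert {α : Type} (kf : α → String) (vf : α → String)
    (l : List α) (d : PySem.Dict String String) :
    (l.foldl (fun d x => d.insert (kf x) (vf x)) d).keys = PySem.Set.update d.keys (l.map kf) :=
  PySem.Dict.keys_foldl_insert_key l kf (fun _ x => vf x) d

theorem pvNodup_dictOf (l : List String) : (pvDictOf l).keys.Nodup :=
  PySem.Dict.nodup_keys_foldl_insert_key l _ _ _ PySem.Dict.nodup_keys_empty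

theorem pvUpdate_ofList (s : PySem.Set String) (l : List String) :
    s.update (PySem.Set.ofList l) = s.update l := by
  rw [PySem.Set.update_eq_append_filter, PySem.Set.update_eq_append_filter,
    PySem.Set.ofList_ofList]

theorem pvFind?_reverse_of_nodup (xs : List (String × String)) (j : String)
    (h : (xs.map Prod.fst).Nodup) :
    xs.reverse.find? (fun p => p.1 == j) = xs.find? (fun p => p.1 == j) := by
  induction xs with
  | nil => simp
  | cons p t ih =>
      simp only [List.map_cons, List.nodup_cons] at h
      simp only [List.reverse_cons, List.find?_append]
      by_cases hp : p.1 = j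
      · have : t.reverse.find? (fun p => p.1 == j) = none := by
          rw [List.find?_eq_none]
          intro q hq
          have : q.1 ∈ t.map Prod.fst := List.mem_map_of_mem (List.mem_reverse.mp hq)
          simp only [beq_iff_eq]
          intro hc; exact h.1 (by rwa [hp, ← hc])
        simp [this, hp]
      · simp [ih h.2, hp]

-- A's merged dict is one insert fold over the concatenation
theorem pvDicts_eq (a b : List String) :
    (pvDictOf b).items.foldl (fun d p => d.insert p.1 p.2) (pvDictOf a)
      = (a ++ b).foldl (fun d s => d.insert (pvParseKV s).1 (pvParseKV s).2) PySem.Dict.empty := by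
  set dA := (pvDictOf b).items.foldl (fun d p => d.insert p.1 p.2) (pvDictOf a) with hdA
  set dB := (a ++ b).foldl (fun d s => d.insert (pvParseKV s).1 (pvParseKV s).2) PySem.Dict.empty with hdB
  have hndA : dA.keys.Nodup := by
    rw [hdA]
    exact PySem.Dict.nodup_keys_foldl_insert_key _ Prod.fst (fun d p => p.2) _ (pvNodup_dictOf a)
  have hndB : dB.keys.Nodup := by
    rw [hdB]
    exact PySem.Dict.nodup_keys_foldl_insert_key _ _ _ _ PySem.Dict.nodup_keys_empty
  have hkeys : dA.keys = dB.keys := by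
    rw [hdA, hdB]
    rw [pvKeys_foldl_insert Prod.fst Prod.snd, pvKeys_foldl_insert (fun s => (pvParseKV s).1) (fun s => (pvParseKV s).2)]
    have h1 : (pvDictOf b).items.map Prod.fst = (pvDictOf b).keys := rfl
    rw [h1]
    unfold pvDictOf
    rw [pvKeys_foldl_insert (fun s => (pvParseKV s).1) (fun s => (pvParseKV s).2),
        pvKeys_foldl_insert (fun s => (pvParseKV s).1) (fun s => (pvParseKV s).2)]
    have hk : (PySem.Dict.empty : PySem.Dict String String).keys = ([] : List String) := rfl
    rw [hk]
    show PySem.Set.update (PySem.Set.update ([] : PySem.Set String) (a.map fun s => (pvParseKV s).1))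
        (PySem.Set.update ([] : PySem.Set String) (b.map fun s => (pvParseKV s).1))
      = PySem.Set.update ([] : PySem.Set String) ((a ++ b).map fun s => (pvParseKV s).1)
    rw [PySem.Set.update_nil_left, PySem.Set.update_nil_left, pvUpdate_ofList,
        List.map_append, PySem.Set.update_nil_left, PySem.Set.ofList_append]
  have hget : ∀ j, dA.get? j = dB.get? j := by
    intro j
    rw [hdA, hdB]
    rw [pvGet?_foldl_insert Prod.fst Prod.snd, pvGet?_foldl_insert (fun s => (pvParseKV s).1) (fun s => (pvParseKV s).2)]
    rw [pvFind?_reverse_of_nodup _ j (pvNodup_dictOf b)]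
    have hb : ((pvDictOf b).items.find? (fun p => p.1 == j)).map Prod.snd = (pvDictOf b).get? j := rfl
    rw [hb]
    unfold pvDictOf
    rw [pvGet?_foldl_insert (fun s => (pvParseKV s).1) (fun s => (pvParseKV s).2)]
    rw [List.reverse_append, List.find?_append]
    cases hf : b.reverse.find? (fun s => (pvParseKV s).1 == j) with
    | some y => simp
    | none => simp [pvGet?_foldl_insert (fun s => (pvParseKV s).1) (fun s => (pvParseKV s).2)]
  apply PySem.Dict.ext
  rw [PySem.Dict.items_eq_map_keys dA hndA "", PySem.Dict.items_eq_map_keys dB hndB "", hkeys]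
  apply List.map_congr_left
  intro k _
  rw [PySem.Dict.getD_eq_get?_getD, PySem.Dict.getD_eq_get?_getD, hget]

-- the merged dict's lookup is B's backward scan
theorem pvGetD_eq_lastValue (a b : List String) (k : String) :
    ((a ++ b).foldl (fun d s => d.insert (pvParseKV s).1 (pvParseKV s).2)
      (PySem.Dict.empty : PySem.Dict String String)).getD k ""
      = pvLastValue (a.map pvParseKV ++ b.map pvParseKV) k := by
  rw [PySem.Dict.getD_eq_get?_getD,
      pvGet?_foldl_insert (fun s => (pvParseKV s).1) (fun s => (pvParseKV s).2)]
  unfold pvLastValue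
  rw [← List.map_append, ← List.map_reverse, List.find?_map]
  have hc : ((fun p : String × String => p.1 == k) ∘ pvParseKV) = (fun s => (pvParseKV s).1 == k) := rfl
  rw [hc]
  cases h : (a ++ b).reverse.find? (fun s => (pvParseKV s).1 == k) <;> rfl

-- B's seen-list fold, characterised
theorem pvFoldSeen (pairs0 : List (String × String)) (l : List (String × String))
    (acc seen : List String) :
    (l.foldl
      (fun (st : List String × List String) p =>
        if st.2.contains p.1 then st
        else (st.1 ++ [p.1 ++ "=" ++ pvLastValue pairs0 p.1], st.2 ++ [p.1]))
      (acc, seen)).1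
    = acc ++ ((PySem.Set.ofList (l.map Prod.fst)).filter
        (fun k => !(seen.contains k))).map (fun k => k ++ "=" ++ pvLastValue pairs0 k) := by
  induction l generalizing acc seen with
  | nil => simp [PySem.Set.ofList_nil]
  | cons p t ih =>
      simp only [List.foldl_cons, List.map_cons, PySem.Set.ofList_cons]
      have hd : PySem.Set.discard (PySem.Set.ofList (t.map Prod.fst)) p.1
          = (PySem.Set.ofList (t.map Prod.fst)).filter (fun y => y != p.1) := rfl
      by_cases hp : seen.contains p.1 = true
      · rw [if_pos hp, ih]
        have hmem : p.1 ∈ seen := by simpa using hp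
        have hfc : (PySem.Set.ofList (t.map Prod.fst)).filter (fun a => !seen.contains a && a != p.1)
            = (PySem.Set.ofList (t.map Prod.fst)).filter (fun k => !seen.contains k) := by
          apply List.filter_congr
          intro y _
          by_cases hy : y ∈ seen
          · simp [hy]
          · have hne : y ≠ p.1 := fun h => hy (h ▸ hmem)
            simp [hy, hne]
        simp only [hd, List.filter_cons, hp, Bool.not_true, Bool.false_eq_true, if_false,
          List.filter_filter, hfc]
      · rw [if_neg hp, ih]
        have hb : seen.contains p.1 = false := by simpa using hp
        have hfc : (PySem.Set.ofList (t.map Prod.fst)).filter (fun k => !((seen ++ [p.1]).contains k))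
            = (PySem.Set.ofList (t.map Prod.fst)).filter (fun a => !seen.contains a && a != p.1) := by
          apply List.filter_congr
          intro y _
          by_cases hy : y = p.1
          · subst hy; simp
          · by_cases hs : y ∈ seen <;> simp [hy, hs]
        rw [hfc]
        simp only [hd, List.filter_cons, hb, Bool.not_false, if_true, List.filter_filter,
          List.map_cons]
        simp

-- ===== VERDICT (by name: the statement is the Claim_ definition above) =====
theorem merge_env_vars_py_spec : Claim_equal_merge_env_vars_py := by
  intro a b _ _
  unfold Spec_merge_env_vars_py merge_env_vars_py merge_env_vars_py_alt
  dsimp only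
  rw [pvDicts_eq a b, pvFoldSeen]
  have hnd : ((a ++ b).foldl (fun d s => d.insert (pvParseKV s).1 (pvParseKV s).2)
      (PySem.Dict.empty : PySem.Dict String String)).keys.Nodup :=
    PySem.Dict.nodup_keys_foldl_insert_key _ _ _ _ PySem.Dict.nodup_keys_empty
  rw [PySem.Dict.items_eq_map_keys _ hnd ""]
  have hkeys : ((a ++ b).foldl (fun d s => d.insert (pvParseKV s).1 (pvParseKV s).2)
      (PySem.Dict.empty : PySem.Dict String String)).keys
      = PySem.Set.ofList ((a.map pvParseKV ++ b.map pvParseKV).map Prod.fst) := by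
    rw [pvKeys_foldl_insert (fun s => (pvParseKV s).1) (fun s => (pvParseKV s).2)]
    have hk : (PySem.Dict.empty : PySem.Dict String String).keys = ([] : List String) := rfl
    rw [hk]
    show PySem.Set.update ([] : PySem.Set String) ((a ++ b).map fun s => (pvParseKV s).1) = _
    rw [PySem.Set.update_nil_left, ← List.map_append, List.map_map]
    rfl
  rw [List.map_map, hkeys]
  simp only [List.contains_nil, Bool.not_false, List.filter_true]
  apply List.map_congr_left
  intro k _
  simp only [Function.comp]
  rw [pvGetD_eq_lastValue]
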